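-- pv_equiv track=rewrite | github.com/pokerdio/generic | e/e-762.py | go
-- ===== SOURCE A (Python) =====
-- from builtins import sum
--
-- def int4(v):
--     return v[0] + v[1] * 10 + v[2] * 100 + v[3] * 1000
--
-- def expand(n):
--     v = [int(c) for c in reversed("%04d" % n)]
--
--     ret = [0] * 4
--
--     base = 0
--
--     for i in range(4):
--         over = v[i] - 1
--         if over > 0:
--             ret[i] += over
--             ret[(i + 1) % 4] += over
--             base += over
--         v[i] = min(v[i], 1)
--
--     for i in range(16):
--         v2 = [int(((1 << x) & i) > 0) for x in range(4)]
--
--         if True in (v2[x] > v[x] for x in range(4)):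
--             continue
--
--         ret2 = ret.copy()
--         base2 = base
--         for j in range(4):
--             if v2[j]:
--                 ret2[j] += 1
--                 ret2[(j + 1) % 4] += 1
--                 base2 += 1
--         if base2 and sum(ret2) < 8:
--             yield base2, int4(ret2)
--
-- def gen_trans():
--     g = {}
--     new = {1}
--     while new:
--         new2 = set()
--         for x in new:
--             g[x] = list(expand(x))
--             for delta, y in g[x]:
--                 if y not in g:
--                     new2.add(y)
--
--         new = new2
--     return g
--
-- def go(n):
--     v = [{1: 1}, {}, {}, {}]
--
--     g = gen_trans()
--     for _ in range(n):
--         for pos, count in v[0].items():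
--             for delta, pos2 in g[pos]:
--                 v[delta][pos2] = (v[delta].get(pos2, 0) + count) % 1000000000
--         v = v[1:] + [{}]
--     ret = 0
--     for pos, count in v[0].items():
--         if max(str(pos)) == "1":
--             ret += count
--     return ret % 1000000000
-- ===== SOURCE B (Python) =====
-- # go(n) re-implemented by binary exponentiation of the fixed 75x75 linear
-- # transition operator (25 reachable positions x 3 delay slots), mod 1e9.
--
-- MOD = 1000000000
--
-- # The fixed transition system: from position p, an edge (d, y) means "after d
-- # steps, one token at position y".  (25 positions are reachable from 1.)
-- STATES = [1, 11, 110, 121, 1100, 1210, 220, 231, 1221, 1320, 1001, 2101, 2200, 2310, 2211, 3201, 1012, 2112, 2002, 2013, 3102, 22, 132, 1023, 1122]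
-- EDGES = {
--     1: [(1, 11)],
--     11: [(1, 11), (1, 110), (2, 121)],
--     110: [(1, 110), (1, 1100), (2, 1210)],
--     121: [(1, 110), (2, 121), (2, 220), (3, 231), (2, 1210), (3, 1221), (3, 1320)],
--     1100: [(1, 1100), (1, 1001), (2, 2101)],
--     1210: [(1, 1100), (2, 1210), (2, 2200), (3, 2310), (2, 2101), (3, 2211), (3, 3201)],
--     220: [(2, 1210), (3, 1320), (3, 2310)],
--     231: [(3, 1320)],
--     1221: [(2, 1210), (3, 1221), (3, 1320), (3, 2310), (3, 2211)],
--     1320: [(3, 2310)],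
--     1001: [(1, 11), (1, 1001), (2, 1012)],
--     2101: [(1, 1001), (2, 1012), (2, 2101), (3, 2112), (2, 2002), (3, 2013), (3, 3102)],
--     2200: [(2, 2101), (3, 3201), (3, 3102)],
--     2310: [(3, 3201)],
--     2211: [(2, 2101), (3, 2112), (3, 2211), (3, 3201), (3, 3102)],
--     3201: [(3, 3102)],
--     1012: [(1, 11), (2, 22), (2, 121), (3, 132), (2, 1012), (3, 1023), (3, 1122)],
--     2112: [(2, 1012), (3, 1023), (3, 1122), (3, 2112), (3, 2013)],
--     2002: [(2, 1012), (3, 1023), (3, 2013)],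
--     2013: [(3, 1023)],
--     3102: [(3, 2013)],
--     22: [(2, 121), (3, 132), (3, 231)],
--     132: [(3, 231)],
--     1023: [(3, 132)],
--     1122: [(2, 121), (3, 132), (3, 231), (3, 1221), (3, 1122)],
-- }
--
-- # Combined state (slot s in 0..2, position STATES[p]) <-> index 25*s + p.
-- # One DP step: slot s receives slot s+1, and slot s receives, from every active
-- # position q (slot 0), one token at y for each edge (s+1, y) of q.
-- def entry(i, j):
--     si, pi = divmod(i, 25)
--     sj, pj = divmod(j, 25)
--     e = 1 if (sj == si + 1 and pi == pj) else 0
--     if sj == 0: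
--         e += EDGES[STATES[pj]].count((si + 1, STATES[pi]))
--     return e
--
-- MAT = [[entry(i, j) for j in range(75)] for i in range(75)]
--
-- def rowmul(row, B):
--     acc = [0] * len(B[0])
--     for x, brow in zip(row, B):
--         acc = [a + x * b for a, b in zip(acc, brow)]
--     return acc
--
-- def matmul(A, B):
--     return [[v % MOD for v in rowmul(row, B)] for row in A]
--
-- def matpow(M, e):
--     R = [[1 if i == j else 0 for j in range(75)] for i in range(75)]
--     while e:
--         if e & 1:
--             R = matmul(R, M)
--         M = matmul(M, M)
--         e >>= 1
--     return R
--
-- GOOD = [i for i, s in enumerate(STATES) if max(str(s)) == "1"]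
--
-- def go(n):
--     P = matpow(MAT, max(n, 0))
--     # start = one token at position 1, slot 0 = index 0; answer = good entries
--     # of P applied to e_0, i.e. of P's first column.
--     return sum(P[i][0] for i in GOOD) % MOD
-- ===== Notes on version B (the rewrite author's own statement) =====
-- stated objective: faster
-- what changed: A iterates the DP step once per unit of n over dicts of reachable positions; B encodes the fixed finite transition system (reachable positions x delay slots) as a 75x75 integer matrix mod 1e9 and computes the answer by binary exponentiation of that matrix, reading the good entries of its first column.
import Mathlib
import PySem

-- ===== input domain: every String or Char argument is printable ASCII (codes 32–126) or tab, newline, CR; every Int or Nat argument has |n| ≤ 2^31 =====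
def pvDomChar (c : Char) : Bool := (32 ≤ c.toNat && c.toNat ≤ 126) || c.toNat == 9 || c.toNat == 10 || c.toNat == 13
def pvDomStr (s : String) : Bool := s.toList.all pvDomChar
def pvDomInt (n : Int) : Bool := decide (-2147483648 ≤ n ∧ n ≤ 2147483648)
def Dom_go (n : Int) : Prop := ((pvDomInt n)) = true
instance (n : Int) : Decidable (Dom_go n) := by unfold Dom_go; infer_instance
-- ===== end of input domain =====

-- B replaces A's n-step dict DP (O(n) steps over the fixed 25-position/3-delay
-- transition system) by binary exponentiation of the corresponding 75x75
-- transition matrix mod 1e9 (O(log n) matrix products).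

-- ===== PORT A =====
def int4 (v : List Int) : Int :=
  -- v[0] + v[1]*10 + v[2]*100 + v[3]*1000; every call passes a 4-element list
  v.getD 0 0 + v.getD 1 0 * 10 + v.getD 2 0 * 100 + v.getD 3 0 * 1000

def expand (n : Int) : List (Int × Int) :=
  -- "%04d" % n is str(n) zero-padded to width 4 (exact for n ≥ 0, the only calls);
  -- int(c) of the single digit char c (PySem.Int.ofChars?; digits for every call)
  let v : List Int := ((PySem.Chars.zfill (PySem.Int.toChars n) 4).reverse).map
      (fun c => (PySem.Int.ofChars? [c]).getD 0)
  let st := (List.range 4).foldl (fun (st : List Int × List Int × Int) i =>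
      let ov := st.1.getD i 0 - 1
      let rb := if ov > 0 then
          (((st.2.1.modify i (· + ov)).modify ((i+1) % 4) (· + ov)), st.2.2 + ov)
        else (st.2.1, st.2.2)
      (st.1.modify i (fun x => min x 1), rb.1, rb.2))
    (v, [0,0,0,0], 0)
  (List.range 16).foldl (fun acc i =>
      let v2 : List Int := (List.range 4).map (fun x => if ((1 <<< x) &&& i) > 0 then 1 else 0)
      if (List.range 4).any (fun x => v2.getD x 0 > st.1.getD x 0) then acc
      else
        let rb := (List.range 4).foldl (fun (st : List Int × Int) j =>
            if v2.getD j 0 ≠ 0 then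
              (((st.1.modify j (· + 1)).modify ((j+1) % 4) (· + 1)), st.2 + 1)
            else st)
          (st.2.1, st.2.2)
        if rb.2 ≠ 0 ∧ rb.1.sum < 8 then acc ++ [(rb.2, int4 rb.1)] else acc)
    []

def genLoop : Nat → PySem.Dict Int (List (Int × Int)) → PySem.Set Int → PySem.Dict Int (List (Int × Int))
  | 0, g, _ => g        -- fuel: the BFS visits the 25 reachable states, 100 is ample
  | fuel+1, g, new =>
    if new = [] then g else
      let st := new.foldl (fun (st : PySem.Dict Int (List (Int × Int)) × PySem.Set Int) x =>
          let e := expand x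
          let g := st.1.insert x e
          (g, e.foldl (fun s dy => if g.contains dy.2 then s else PySem.Set.add s dy.2) st.2)) (g, PySem.Set.empty)
      genLoop fuel st.1 st.2

def gen_trans : PySem.Dict Int (List (Int × Int)) :=
  genLoop 100 PySem.Dict.empty (PySem.Set.ofList [1])

def go (n : Int) : Int :=
  let g := gen_trans
  let v0 : List (PySem.Dict Int Int) := [PySem.Dict.ofList [(1,1)], PySem.Dict.empty, PySem.Dict.empty, PySem.Dict.empty]
  let v := (PySem.List.pyRange 0 n 1).foldl (fun v _ =>
      -- v[delta][pos2] update: delta ∈ {1,2,3} for every edge, v has 4 dicts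
      let v := (v.headD PySem.Dict.empty).items.foldl (fun v pc =>
          (g.getD pc.1 []).foldl (fun (v : List (PySem.Dict Int Int)) dy =>
              v.modify dy.1.toNat (fun d => d.insert dy.2 (PySem.Int.mod (d.getD dy.2 0 + pc.2) 1000000000))) v) v
      v.drop 1 ++ [PySem.Dict.empty]) v0
  let ret := (v.headD PySem.Dict.empty).items.foldl (fun ret pc =>
      if PySem.List.max? (PySem.Int.toChars pc.1) (fun c => c) == some '1' then ret + pc.2 else ret) (0 : Int)
  PySem.Int.mod ret 1000000000

-- ===== PORT B =====
def statesL : List Int :=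
  [1, 11, 110, 121, 1100, 1210, 220, 231, 1221, 1320, 1001, 2101, 2200, 2310,
   2211, 3201, 1012, 2112, 2002, 2013, 3102, 22, 132, 1023, 1122]

def edgesT : PySem.Dict Int (List (Int × Int)) := PySem.Dict.ofList
  [(1, [(1, 11)]), (11, [(1, 11), (1, 110), (2, 121)]), (110, [(1, 110), (1, 1100), (2, 1210)]),
   (121, [(1, 110), (2, 121), (2, 220), (3, 231), (2, 1210), (3, 1221), (3, 1320)]),
   (1100, [(1, 1100), (1, 1001), (2, 2101)]),
   (1210, [(1, 1100), (2, 1210), (2, 2200), (3, 2310), (2, 2101), (3, 2211), (3, 3201)]),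
   (220, [(2, 1210), (3, 1320), (3, 2310)]), (231, [(3, 1320)]),
   (1221, [(2, 1210), (3, 1221), (3, 1320), (3, 2310), (3, 2211)]), (1320, [(3, 2310)]),
   (1001, [(1, 11), (1, 1001), (2, 1012)]),
   (2101, [(1, 1001), (2, 1012), (2, 2101), (3, 2112), (2, 2002), (3, 2013), (3, 3102)]),
   (2200, [(2, 2101), (3, 3201), (3, 3102)]), (2310, [(3, 3201)]),
   (2211, [(2, 2101), (3, 2112), (3, 2211), (3, 3201), (3, 3102)]), (3201, [(3, 3102)]),
   (1012, [(1, 11), (2, 22), (2, 121), (3, 132), (2, 1012), (3, 1023), (3, 1122)]),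
   (2112, [(2, 1012), (3, 1023), (3, 1122), (3, 2112), (3, 2013)]), (2002, [(2, 1012), (3, 1023), (3, 2013)]),
   (2013, [(3, 1023)]), (3102, [(3, 2013)]), (22, [(2, 121), (3, 132), (3, 231)]), (132, [(3, 231)]),
   (1023, [(3, 132)]), (1122, [(2, 121), (3, 132), (3, 231), (3, 1221), (3, 1122)])]

def entryB (i j : Nat) : Int :=
  let e : Int := if j / 25 = i / 25 + 1 ∧ i % 25 = j % 25 then 1 else 0
  if j / 25 = 0 then
    e + ((edgesT.getD (statesL.getD (j % 25) 0) []).count (((i / 25 : Nat) : Int) + 1, statesL.getD (i % 25) 0) : Int)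
  else e

def matLit : List (List Int) := (List.range 75).map (fun i => (List.range 75).map (fun j => entryB i j))

def rowmul (row : List Int) (B : List (List Int)) : List Int :=
  (row.zip B).foldl (fun acc xb => List.zipWith (fun a b => a + xb.1 * b) acc xb.2)
    (List.replicate (B.headD []).length 0)

def matmulL (A B : List (List Int)) : List (List Int) :=
  A.map (fun row => (rowmul row B).map (fun v => PySem.Int.mod v 1000000000))

def idMat : List (List Int) :=
  (List.range 75).map (fun i => (List.range 75).map (fun j => if i = j then (1:Int) else 0))

def powLoop (M R : List (List Int)) (e : Nat) : List (List Int) :=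
  if e = 0 then R
  else powLoop (matmulL M M) (if e % 2 = 1 then matmulL R M else R) (e / 2)
decreasing_by exact Nat.div_lt_self (Nat.pos_of_ne_zero (by assumption)) (by norm_num)

def goodIdx : List Int :=
  ((PySem.List.enumerate statesL).filter
    (fun p => PySem.List.max? (PySem.Int.toChars p.2) (fun c => c) == some '1')).map (fun p => p.1)

def go_alt (n : Int) : Int :=
  let P := powLoop matLit idMat (max n 0).toNat
  PySem.Int.mod (goodIdx.foldl (fun s i => s + ((P.getD i.toNat []).headD 0)) 0) 1000000000

-- ===== PRECONDITION & SPEC =====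
def Spec_go (n : Int) (out : Int) : Prop := out = go_alt n
instance (n : Int) (out : Int) : Decidable (Spec_go n out) := by unfold Spec_go; infer_instance

-- ===== CLAIM (what is proved, stated in full; the proofs are below) =====
def Claim_equal_go : Prop := ∀ (n : Int), Dom_go n → Spec_go n (go n)

-- ===== LEMMAS AND PROOFS =====

-- the BFS-generated transition table is the fixed table B hardcodes
theorem gt_eq : gen_trans = edgesT := by decide


abbrev ZM := ZMod 1000000000

theorem castMod (x : Int) : ((PySem.Int.mod x 1000000000 : Int) : ZM) = (x : ZM) := by
  rw [PySem.Int.mod_eq_emod_of_pos (by norm_num : (0:ℤ) < 1000000000)]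
  have : ((1000000000 : ℕ) : ℤ) = (1000000000 : ℤ) := by norm_num
  rw [← this, ZMod.intCast_mod]

def vAt (v : List (PySem.Dict Int Int)) (i : Nat) : PySem.Dict Int Int := v.getD i PySem.Dict.empty

def updEdge (c : Int) (w : List (PySem.Dict Int Int)) (dy : Int × Int) : List (PySem.Dict Int Int) :=
  w.modify dy.1.toNat (fun d => d.insert dy.2 (PySem.Int.mod (d.getD dy.2 0 + c) 1000000000))

def stepA (v : List (PySem.Dict Int Int)) : List (PySem.Dict Int Int) :=
  ((v.headD PySem.Dict.empty).items.foldl (fun v pc =>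
      (edgesT.getD pc.1 []).foldl (fun (v : List (PySem.Dict Int Int)) dy =>
          v.modify dy.1.toNat (fun d => d.insert dy.2 (PySem.Int.mod (d.getD dy.2 0 + pc.2) 1000000000))) v) v).drop 1
    ++ [PySem.Dict.empty]

def extractA (v : List (PySem.Dict Int Int)) : Int :=
  (v.headD PySem.Dict.empty).items.foldl (fun ret pc =>
      if PySem.List.max? (PySem.Int.toChars pc.1) (fun c => c) == some '1' then ret + pc.2 else ret) (0 : Int)

def vInit : List (PySem.Dict Int Int) :=
  [PySem.Dict.ofList [(1,1)], PySem.Dict.empty, PySem.Dict.empty, PySem.Dict.empty]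

theorem foldl_iterate {α β : Type} (f : α → α) (l : List β) (a : α) :
    l.foldl (fun x _ => f x) a = f^[l.length] a := by
  induction l generalizing a with
  | nil => rfl
  | cons x t ih => simp [List.foldl_cons, Function.iterate_succ_apply, ih]

theorem length_pyRange_zero (n : Int) : (PySem.List.pyRange 0 n 1).length = n.toNat := by
  by_cases h : 0 ≤ n
  · obtain ⟨m, rfl⟩ := Int.eq_ofNat_of_zero_le h
    rw [PySem.List.pyRange_zero_natCast]; simp
  · have h1 : (PySem.List.pyRange 0 n 1) = [] := by
      apply List.eq_nil_iff_forall_not_mem.2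
      intro x hx
      have := PySem.List.mem_pyRange_one.1 hx
      omega
    rw [h1]; simp; omega

theorem go_eq (n : Int) :
    go n = PySem.Int.mod (extractA (stepA^[n.toNat] vInit)) 1000000000 := by
  have hfun : (fun (v : List (PySem.Dict Int Int)) (_ : Int) =>
      ((v.headD PySem.Dict.empty).items.foldl (fun v pc =>
          (gen_trans.getD pc.1 []).foldl (fun (v : List (PySem.Dict Int Int)) dy =>
              v.modify dy.1.toNat (fun d => d.insert dy.2 (PySem.Int.mod (d.getD dy.2 0 + pc.2) 1000000000))) v) v).drop 1
        ++ [PySem.Dict.empty]) = (fun v _ => stepA v) := by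
    rw [gt_eq]; rfl
  show PySem.Int.mod (extractA ((PySem.List.pyRange 0 n 1).foldl (fun v _ =>
      ((v.headD PySem.Dict.empty).items.foldl (fun v pc =>
          (gen_trans.getD pc.1 []).foldl (fun (v : List (PySem.Dict Int Int)) dy =>
              v.modify dy.1.toNat (fun d => d.insert dy.2 (PySem.Int.mod (d.getD dy.2 0 + pc.2) 1000000000))) v) v).drop 1
        ++ [PySem.Dict.empty]) vInit)) 1000000000 = _
  rw [hfun, foldl_iterate, length_pyRange_zero]

theorem listGetD_modify {α : Type} (l : List α) (i j : Nat) (f : α → α) (d : α) :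
    (l.modify i f).getD j d = if i = j ∧ j < l.length then f (l.getD j d) else l.getD j d := by
  simp only [List.getD_eq_getElem?_getD, List.getElem?_modify]
  by_cases hij : i = j
  · subst hij
    by_cases hl : i < l.length
    · simp [hl]
    · simp [hl]
  · simp [hij]

theorem inner_spec (E : List (Int × Int)) (c : Int) :
    ∀ (w : List (PySem.Dict Int Int)), (∀ dy ∈ E, dy.1.toNat < w.length) →
    (E.foldl (updEdge c) w).length = w.length ∧
    (∀ i, (vAt w i).keys.Nodup → (vAt (E.foldl (updEdge c) w) i).keys.Nodup) ∧
    (∀ i k, (vAt (E.foldl (updEdge c) w) i).contains k =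
      ((vAt w i).contains k || E.any (fun dy => dy.1.toNat == i && dy.2 == k))) ∧
    (∀ i k, (((vAt (E.foldl (updEdge c) w) i).getD k 0 : Int) : ZM) =
      ((vAt w i).getD k 0 : ZM) + (E.countP (fun dy => dy.1.toNat == i && dy.2 == k) : ZM) * (c : ZM)) := by
  induction E with
  | nil => intro w _; simp
  | cons dy E ih =>
    intro w hE
    have hd : dy.1.toNat < w.length := hE dy (by simp)
    set w' := updEdge c w dy with hw'
    have hlen : w'.length = w.length := by simp [hw', updEdge]
    have hE' : ∀ e ∈ E, e.1.toNat < w'.length := by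
      intro e he; rw [hlen]; exact hE e (by simp [he])
    obtain ⟨iha, ihb, ihc, ihd⟩ := ih w' hE'
    -- facts about one update
    have hvAt : ∀ i, vAt w' i = if dy.1.toNat = i then
        (vAt w i).insert dy.2 (PySem.Int.mod ((vAt w i).getD dy.2 0 + c) 1000000000) else vAt w i := by
      intro i
      simp only [hw', updEdge, vAt, listGetD_modify]
      by_cases h : dy.1.toNat = i
      · subst h; simp [hd]
      · simp [h]
    refine ⟨by simpa [hlen] using iha, ?_, ?_, ?_⟩
    · intro i hnd
      apply ihb
      rw [hvAt i]
      by_cases h : dy.1.toNat = i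
      · simp [h]; exact PySem.Dict.nodup_keys_insert _ _ _ hnd
      · simpa [h] using hnd
    · intro i k
      rw [show (dy :: E).foldl (updEdge c) w = E.foldl (updEdge c) w' from rfl, ihc i k, hvAt i]
      by_cases h : dy.1.toNat = i
      · subst h
        rw [if_pos rfl, PySem.Dict.contains_insert]
        by_cases hk : k = dy.2
        · simp [hk, Bool.or_comm, Bool.or_assoc, Bool.or_left_comm]
        · simp [List.any_cons, show (k == dy.2) = false from by simp [hk],
                show (dy.2 == k) = false from by simp [Ne.symm hk]]
      · have : ¬ (dy.1.toNat == i) = true := by simp [h]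
        simp [h, this]
    · intro i k
      rw [show (dy :: E).foldl (updEdge c) w = E.foldl (updEdge c) w' from rfl, ihd i k, hvAt i]
      by_cases h : dy.1.toNat = i
      · subst h
        rw [if_pos rfl, PySem.Dict.getD_insert]
        by_cases hk : k = dy.2
        · subst hk
          rw [if_pos rfl, castMod]
          push_cast
          simp [List.countP_cons]
          ring
        · rw [if_neg hk]
          rw [List.countP_cons]
          simp [show (dy.2 == k) = false from by simp [Ne.symm hk]]
      · have hb : ¬ (dy.1.toNat == i) = true := by simp [h]
        simp [h, List.countP_cons, hb]

def edgeHit (i : Nat) (k : Int) (p : Int) : Bool :=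
  (edgesT.getD p []).any (fun dy => dy.1.toNat == i && dy.2 == k)

def cntE (p : Int) (i : Nat) (k : Int) : Nat :=
  (edgesT.getD p []).countP (fun dy => dy.1.toNat == i && dy.2 == k)

theorem outer_spec (L : List (Int × Int)) :
    ∀ (w : List (PySem.Dict Int Int)),
    (∀ pc ∈ L, ∀ dy ∈ edgesT.getD pc.1 [], dy.1.toNat < w.length) →
    (L.foldl (fun w pc => (edgesT.getD pc.1 []).foldl (updEdge pc.2) w) w).length = w.length ∧
    (∀ i, (vAt w i).keys.Nodup →
      (vAt (L.foldl (fun w pc => (edgesT.getD pc.1 []).foldl (updEdge pc.2) w) w) i).keys.Nodup) ∧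
    (∀ i k, (vAt (L.foldl (fun w pc => (edgesT.getD pc.1 []).foldl (updEdge pc.2) w) w) i).contains k =
      ((vAt w i).contains k || L.any (fun pc => edgeHit i k pc.1))) ∧
    (∀ i k, (((vAt (L.foldl (fun w pc => (edgesT.getD pc.1 []).foldl (updEdge pc.2) w) w) i).getD k 0 : Int) : ZM) =
      ((vAt w i).getD k 0 : ZM) + (L.map (fun pc => (cntE pc.1 i k : ZM) * (pc.2 : ZM))).sum) := by
  induction L with
  | nil => intro w _; simp
  | cons pc L ih =>
    intro w hL
    have hpc : ∀ dy ∈ edgesT.getD pc.1 [], dy.1.toNat < w.length := hL pc (by simp)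
    obtain ⟨ia, ib, ic, id⟩ := inner_spec (edgesT.getD pc.1 []) pc.2 w hpc
    set w' := (edgesT.getD pc.1 []).foldl (updEdge pc.2) w with hw'
    have hL' : ∀ qc ∈ L, ∀ dy ∈ edgesT.getD qc.1 [], dy.1.toNat < w'.length := by
      intro qc hq dy hdy; rw [ia]; exact hL qc (by simp [hq]) dy hdy
    obtain ⟨oa, ob, oc, od⟩ := ih w' hL'
    refine ⟨by rw [List.foldl_cons, ← hw', oa, ia], ?_, ?_, ?_⟩
    · intro i hnd; rw [List.foldl_cons, ← hw']; exact ob i (ib i hnd)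
    · intro i k
      rw [List.foldl_cons, ← hw', oc i k, ic i k]
      simp [edgeHit, Bool.or_assoc]
    · intro i k
      rw [List.foldl_cons, ← hw', od i k, id i k]
      simp [cntE]
      ring

theorem statesL_nodup : statesL.Nodup := by decide

-- every edge of the table has delay in {1,2,3} and a target inside statesL
theorem edges_shape : (statesL.all (fun p => (edgesT.getD p []).all
    (fun dy => ((0 < dy.1 && dy.1 < 4) && statesL.contains dy.2)))) = true := by decide

theorem edge_fact {p : Int} (hp : p ∈ statesL) {dy : Int × Int} (hdy : dy ∈ edgesT.getD p []) :
    0 < dy.1 ∧ dy.1 < 4 ∧ dy.2 ∈ statesL := by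
  have h := List.all_eq_true.1 edges_shape p hp
  have h2 := List.all_eq_true.1 h dy hdy
  simp only [Bool.and_eq_true, decide_eq_true_eq] at h2
  exact ⟨h2.1.1, h2.1.2, by simpa using h2.2⟩

def U : Type := Fin 3 → Int → ZM

def stepU (u : U) : U := fun s k =>
  (if h : s.1 + 1 < 3 then u ⟨s.1 + 1, h⟩ k else 0) +
  ∑ p ∈ statesL.toFinset, (cntE p (s.1 + 1) k : ZM) * ((u 0 p : ZM))

def uInit : U := fun s k => if s.1 = 0 ∧ k = 1 then 1 else 0

def uIter : Nat → U
  | 0 => uInit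
  | t+1 => stepU (uIter t)

def RelA (v : List (PySem.Dict Int Int)) (u : U) : Prop :=
  v.length = 4 ∧ vAt v 3 = PySem.Dict.empty ∧
  (∀ s : Fin 3, (vAt v s.1).keys.Nodup) ∧
  (∀ s : Fin 3, ∀ k, (vAt v s.1).contains k = true → k ∈ statesL) ∧
  (∀ s : Fin 3, ∀ k, ((vAt v s.1).contains k = true → (((vAt v s.1).getD k 0 : Int) : ZM) = u s k) ∧
                     ((vAt v s.1).contains k = false → u s k = 0))

theorem sum_items_eq (d : PySem.Dict Int Int) (u0 : Int → ZM) (f : Int → ZM)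
    (hnd : d.keys.Nodup)
    (hsub : ∀ k, d.contains k = true → k ∈ statesL)
    (hval : ∀ k, d.contains k = true → ((d.getD k 0 : Int) : ZM) = u0 k)
    (hz : ∀ k, d.contains k = false → u0 k = 0) :
    (d.items.map (fun pc => f pc.1 * ((pc.2 : Int) : ZM))).sum
      = ∑ p ∈ statesL.toFinset, f p * u0 p := by
  rw [PySem.Dict.items_eq_map_keys d hnd 0, List.map_map]
  have h1 : d.keys.map ((fun pc : Int × Int => f pc.1 * ((pc.2 : Int) : ZM)) ∘ (fun k => (k, d.getD k 0)))
      = d.keys.map (fun k => f k * u0 k) := by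
    apply List.map_congr_left
    intro k hk
    simp only [Function.comp]
    rw [hval k ((PySem.Dict.contains_iff_mem_keys _ _).2 hk)]
  rw [h1, ← List.sum_toFinset _ hnd]
  apply Finset.sum_subset
  · intro p hp
    rw [List.mem_toFinset] at hp ⊢
    exact hsub p ((PySem.Dict.contains_iff_mem_keys _ _).2 hp)
  · intro p _ hp
    rw [List.mem_toFinset] at hp
    cases hcp : d.contains p with
    | false => rw [hz p hcp, mul_zero]
    | true => exact absurd ((PySem.Dict.contains_iff_mem_keys _ _).1 hcp) hp

theorem contains_of_mem_items {d : PySem.Dict Int Int} {pc : Int × Int}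
    (hpc : pc ∈ d.items) : d.contains pc.1 = true :=
  (PySem.Dict.contains_iff_mem_keys _ _).2 (PySem.Dict.mem_keys_of_mem_items _ hpc)

theorem step_rel (v : List (PySem.Dict Int Int)) (u : U) (h : RelA v u) :
    RelA (stepA v) (stepU u) := by
  obtain ⟨hlen, h3, hnd, hsub, hval⟩ := h
  have hpre : ∀ pc ∈ (vAt v 0).items, ∀ dy ∈ edgesT.getD pc.1 [], dy.1.toNat < v.length := by
    intro pc hpc dy hdy
    have hk : pc.1 ∈ statesL := hsub 0 pc.1 (contains_of_mem_items hpc)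
    have := edge_fact hk hdy
    omega
  obtain ⟨oa, ob, oc, od⟩ := outer_spec (vAt v 0).items v hpre
  set F := (vAt v 0).items.foldl (fun w pc => (edgesT.getD pc.1 []).foldl (updEdge pc.2) w) v with hF
  have hstep : stepA v = F.drop 1 ++ [PySem.Dict.empty] := by
    rw [stepA, show v.headD PySem.Dict.empty = vAt v 0 from by cases v <;> rfl]
    rfl
  have hF4 : F.length = 4 := by rw [oa, hlen]
  clear_value F
  clear hF
  obtain ⟨f1, f2, f3, f4, rfl⟩ : ∃ a b c d, F = [a, b, c, d] := by
    rcases F with _ | ⟨a, _ | ⟨b, _ | ⟨c, _ | ⟨d, _ | ⟨e, t⟩⟩⟩⟩⟩ <;> simp_all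
  rw [hstep]
  have hv3 : ∀ k : Int, (vAt v 3).contains k = false := by
    intro k; rw [h3]; rfl
  refine ⟨rfl, rfl, ?_, ?_, ?_⟩
  · -- nodup
    intro s
    fin_cases s
    · exact ob 1 (hnd ⟨1, by omega⟩)
    · exact ob 2 (hnd ⟨2, by omega⟩)
    · refine ob 3 ?_
      rw [show vAt v 3 = PySem.Dict.empty from h3]
      exact PySem.Dict.nodup_keys_empty
  · -- keys inside statesL
    intro s k hc
    have hmem : ∀ (i : Nat), i ≤ 3 →
        ((vAt v i).contains k || (vAt v 0).items.any (fun pc => edgeHit i k pc.1)) = true →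
        k ∈ statesL := by
      intro i hi hor
      rcases Bool.or_eq_true_iff.1 hor with hold | hany
      · rcases Nat.lt_or_ge i 3 with hi3 | hi3
        · exact hsub ⟨i, hi3⟩ k hold
        · have : i = 3 := by omega
          rw [this, hv3 k] at hold
          exact absurd hold (by simp)
      · obtain ⟨pc, hpc, hhit⟩ := List.any_eq_true.1 hany
        obtain ⟨dy, hdy, hdk⟩ := List.any_eq_true.1 hhit
        have hps : pc.1 ∈ statesL := hsub 0 pc.1 (contains_of_mem_items hpc)
        have := (edge_fact hps hdy).2.2
        have hk2 : dy.2 = k := by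
          simp only [Bool.and_eq_true, beq_iff_eq] at hdk
          exact hdk.2
        rwa [hk2] at this
    fin_cases s
    · exact hmem 1 (by omega) (by rw [← oc 1 k]; exact hc)
    · exact hmem 2 (by omega) (by rw [← oc 2 k]; exact hc)
    · exact hmem 3 (by omega) (by rw [← oc 3 k]; exact hc)
  · -- values
    intro s k
    have main : ∀ (i : Nat) (hi3 : i < 3),
        ((vAt [f2, f3, f4, PySem.Dict.empty] i).contains k = true →
          (((vAt [f2, f3, f4, PySem.Dict.empty] i).getD k 0 : Int) : ZM) = stepU u ⟨i, hi3⟩ k) ∧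
        ((vAt [f2, f3, f4, PySem.Dict.empty] i).contains k = false → stepU u ⟨i, hi3⟩ k = 0) := by
      intro i hi3
      have hvAtEq : vAt [f2, f3, f4, PySem.Dict.empty] i = vAt [f1, f2, f3, f4] (i+1) := by
        interval_cases i <;> rfl
      -- the shift part is u (i+1) k  (as a ZM value, 0 when i+1 = 3)
      have hshift : (((vAt v (i+1)).getD k 0 : Int) : ZM)
          = (if h : i + 1 < 3 then u ⟨i + 1, h⟩ k else 0) := by
        rcases Nat.lt_or_ge (i+1) 3 with h2 | h2
        · rw [dif_pos h2]
          cases hcv : (vAt v (i+1)).contains k with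
          | true => exact hval ⟨i+1, h2⟩ k |>.1 hcv
          | false =>
            rw [(hval ⟨i+1, h2⟩ k).2 hcv, PySem.Dict.getD_of_not_contains _ _ hcv]
            rfl
        · have : i + 1 = 3 := by omega
          rw [dif_neg (by omega), this, h3]
          rfl
      have hsum : ((vAt v 0).items.map (fun pc => (cntE pc.1 (i+1) k : ZM) * ((pc.2 : Int) : ZM))).sum
          = ∑ p ∈ statesL.toFinset, (cntE p (i+1) k : ZM) * u 0 p := by
        exact sum_items_eq (vAt v 0) (u 0) (fun p => (cntE p (i+1) k : ZM))
          (hnd 0) (hsub 0) (fun k2 => (hval 0 k2).1) (fun k2 => (hval 0 k2).2)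
      constructor
      · intro hc
        rw [hvAtEq, od (i+1) k, hsum, hshift]
        rfl
      · intro hc
        rw [hvAtEq, oc (i+1) k] at hc
        have hold : (vAt v (i+1)).contains k = false := by
          cases hx : (vAt v (i+1)).contains k
          · rfl
          · rw [hx] at hc; simp at hc
        have hany : (vAt v 0).items.any (fun pc => edgeHit (i+1) k pc.1) = false := by
          cases hx : (vAt v 0).items.any (fun pc => edgeHit (i+1) k pc.1)
          · rfl
          · rw [hx] at hc; simp at hc
        show (if h : i + 1 < 3 then u ⟨i + 1, h⟩ k else 0)
          + ∑ p ∈ statesL.toFinset, (cntE p (i+1) k : ZM) * u 0 p = 0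
        have hz1 : (if h : i + 1 < 3 then u ⟨i + 1, h⟩ k else 0) = 0 := by
          rcases Nat.lt_or_ge (i+1) 3 with h2 | h2
          · rw [dif_pos h2]
            exact (hval ⟨i+1, h2⟩ k).2 hold
          · rw [dif_neg (by omega)]
        have hz2 : ∑ p ∈ statesL.toFinset, (cntE p (i+1) k : ZM) * u 0 p = 0 := by
          apply Finset.sum_eq_zero
          intro p hp
          cases hcp : (vAt v 0).contains p with
          | false => rw [(hval 0 p).2 hcp, mul_zero]
          | true =>
            have hpk : p ∈ (vAt v 0).keys := (PySem.Dict.contains_iff_mem_keys _ _).1 hcp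
            have hnd0 : (vAt v 0).keys.Nodup := hnd ⟨0, by omega⟩
            have hpi : (p, (vAt v 0).getD p 0) ∈ (vAt v 0).items := by
              rw [PySem.Dict.items_eq_map_keys _ hnd0 0]
              exact List.mem_map.2 ⟨p, hpk, rfl⟩
            have hhit : edgeHit (i+1) k p = false := by
              simpa using List.any_eq_false.1 hany _ hpi
            have : cntE p (i+1) k = 0 := by
              rw [cntE, List.countP_eq_zero]
              intro dy hdy
              have h5 : ¬ ((dy.1.toNat == i + 1) && (dy.2 == k)) = true :=
                List.any_eq_false.1 hhit dy hdy
              simpa using h5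
            rw [this]
            simp
        rw [hz1, hz2, add_zero]
    fin_cases s <;> exact main _ (by omega)

def goodB (k : Int) : Bool := PySem.List.max? (PySem.Int.toChars k) (fun c => c) == some '1'

theorem rel_init : RelA vInit uInit := by
  refine ⟨rfl, rfl, ?_, ?_, ?_⟩
  · intro s; fin_cases s <;> decide
  · intro s k hc
    have hm := (PySem.Dict.contains_iff_mem_keys _ _).1 hc
    have hkeys : (vAt vInit s.1).keys = [1] ∨ (vAt vInit s.1).keys = [] := by
      rcases s with ⟨i, hi⟩
      interval_cases i
      · left; rfl
      · right; rfl
      · right; rfl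
    rcases hkeys with hkl | hkl <;> rw [hkl] at hm
    · rw [List.mem_singleton] at hm; subst hm; decide
    · exact absurd hm (by simp)
  · intro s k
    rcases s with ⟨i, hi⟩
    interval_cases i
    · constructor
      · intro hc
        have hm := (PySem.Dict.contains_iff_mem_keys _ _).1 hc
        have hkl : (vAt vInit 0).keys = [1] := rfl
        rw [hkl, List.mem_singleton] at hm
        subst hm
        rfl
      · intro hc
        have hk1 : k ≠ 1 := by
          intro hk; subst hk
          rw [show (vAt vInit 0).contains 1 = true from rfl] at hc
          exact absurd hc (by simp)
        simp [uInit, hk1]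
    · refine ⟨fun hc => ?_, fun _ => by simp [uInit]⟩
      revert hc
      show (PySem.Dict.empty : PySem.Dict Int Int).contains k = true → _
      simp
    · refine ⟨fun hc => ?_, fun _ => by simp [uInit]⟩
      revert hc
      show (PySem.Dict.empty : PySem.Dict Int Int).contains k = true → _
      simp

theorem rel_iter (t : Nat) : RelA (stepA^[t] vInit) (uIter t) := by
  induction t with
  | zero => exact rel_init
  | succ t ih =>
    rw [Function.iterate_succ_apply']
    exact step_rel _ _ ih

theorem extract_eq (v : List (PySem.Dict Int Int)) (u : U) (h : RelA v u) :
    ((extractA v : Int) : ZM) = ((statesL.filter goodB).map (fun p => u 0 p)).sum := by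
  obtain ⟨hlen, h3, hnd, hsub, hval⟩ := h
  have hnd0 : (vAt v 0).keys.Nodup := hnd ⟨0, by omega⟩
  have h1 : extractA v = (((vAt v 0).items.filter (fun pc => goodB pc.1)).map (fun pc => pc.2)).sum := by
    rw [extractA, show v.headD PySem.Dict.empty = vAt v 0 from by cases v <;> rfl]
    rw [PySem.List.foldl_if_eq_foldl_filter
        (p := fun pc : Int × Int => PySem.List.max? (PySem.Int.toChars pc.1) (fun c => c) == some '1')
        (f := fun (r : Int) (pc : Int × Int) => r + pc.2)]
    rw [PySem.List.foldl_add (g := fun pc : Int × Int => pc.2)]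
    simp [goodB]
  rw [h1]
  rw [PySem.Dict.items_eq_map_keys _ hnd0 0, List.filter_map, List.map_map]
  rw [show ((fun pc : Int × Int => goodB pc.1) ∘ (fun k : Int => (k, (vAt v 0).getD k 0))) = goodB
      from by funext k; rfl]
  rw [show ((fun pc : Int × Int => pc.2) ∘ (fun k : Int => (k, (vAt v 0).getD k 0)))
      = (fun k : Int => (vAt v 0).getD k 0) from by funext k; rfl]
  rw [Int.cast_list_sum, List.map_map]
  have h4 : (((vAt v 0).keys.filter goodB).map (Int.cast ∘ fun k : Int => (vAt v 0).getD k 0)).sum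
      = (((vAt v 0).keys.filter goodB).map (fun k => u 0 k)).sum := by
    congr 1
    apply List.map_congr_left
    intro k hk
    have hkk : k ∈ (vAt v 0).keys := (List.mem_filter.1 hk).1
    exact (hval 0 k).1 ((PySem.Dict.contains_iff_mem_keys _ _).2 hkk)
  rw [h4]
  have hndf : ((vAt v 0).keys.filter goodB).Nodup := hnd0.filter _
  have hnds : (statesL.filter goodB).Nodup := statesL_nodup.filter _
  rw [← List.sum_toFinset _ hndf, ← List.sum_toFinset _ hnds]
  apply Finset.sum_subset
  · intro p hp
    rw [List.mem_toFinset, List.mem_filter] at hp ⊢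
    exact ⟨hsub 0 p ((PySem.Dict.contains_iff_mem_keys _ _).2 hp.1), hp.2⟩
  · intro p hps hp
    rw [List.mem_toFinset, List.mem_filter] at hps
    rw [List.mem_toFinset] at hp
    cases hcp : (vAt v 0).contains p with
    | false => exact (hval 0 p).2 hcp
    | true =>
      exact absurd (List.mem_filter.2
        ⟨(PySem.Dict.contains_iff_mem_keys _ _).1 hcp, hps.2⟩) hp

abbrev MatZ : Type := Matrix (Fin 75) (Fin 75) ZM

def toMat (m : List (List Int)) : MatZ :=
  Matrix.of fun i j => (((m.getD i.1 []).getD j.1 0 : Int) : ZM)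

def ShapeM (m : List (List Int)) : Prop := m.length = 75 ∧ ∀ r ∈ m, r.length = 75

def A0 : MatZ := Matrix.of fun i j => ((entryB i.1 j.1 : Int) : ZM)

-- list sum of a map as a Finset.range sum over getD
theorem map_sum_eq_range {M : Type} [AddCommMonoid M] (g : Int → M) (d : Int) :
    ∀ (l : List Int), (l.map g).sum = ∑ i ∈ Finset.range l.length, g (l.getD i d) := by
  intro l
  induction l with
  | nil => simp
  | cons x t ih =>
    rw [List.map_cons, List.sum_cons, ih, List.length_cons, Finset.sum_range_succ']
    simp [add_comm]

theorem map_sum_eq_range_pairs {M : Type} [AddCommMonoid M] (g : Int × List Int → M) :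
    ∀ (l : List (Int × List Int)), (l.map g).sum = ∑ i ∈ Finset.range l.length, g (l.getD i (0, [])) := by
  intro l
  induction l with
  | nil => simp
  | cons x t ih =>
    rw [List.map_cons, List.sum_cons, ih, List.length_cons, Finset.sum_range_succ']
    simp [add_comm]

theorem zw_fold (l : List (Int × List Int)) :
    ∀ (acc : List Int), (∀ xb ∈ l, acc.length ≤ xb.2.length) →
    (l.foldl (fun acc xb => List.zipWith (fun a b => a + xb.1 * b) acc xb.2) acc).length = acc.length ∧
    (∀ j, j < acc.length →
      (l.foldl (fun acc xb => List.zipWith (fun a b => a + xb.1 * b) acc xb.2) acc).getD j 0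
        = acc.getD j 0 + (l.map (fun xb => xb.1 * xb.2.getD j 0)).sum) := by
  induction l with
  | nil => intro acc _; simp
  | cons xb l ih =>
    intro acc hl
    have hx : acc.length ≤ xb.2.length := hl xb (by simp)
    set acc' := List.zipWith (fun a b => a + xb.1 * b) acc xb.2 with hacc'
    have hlen : acc'.length = acc.length := by
      rw [hacc', List.length_zipWith]; omega
    have hl' : ∀ yb ∈ l, acc'.length ≤ yb.2.length := by
      intro yb hyb; rw [hlen]; exact hl yb (by simp [hyb])
    obtain ⟨iha, ihb⟩ := ih acc' hl'
    refine ⟨by rw [List.foldl_cons, ← hacc', iha, hlen], ?_⟩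
    intro j hj
    rw [List.foldl_cons, ← hacc', ihb j (by omega)]
    have hgd : acc'.getD j 0 = acc.getD j 0 + xb.1 * xb.2.getD j 0 := by
      rw [hacc']
      rw [List.getD_eq_getElem?_getD, List.getElem?_zipWith]
      rw [List.getElem?_eq_getElem hj, List.getElem?_eq_getElem (by omega : j < xb.2.length)]
      simp [List.getD_eq_getElem?_getD, List.getElem?_eq_getElem, hj,
            (by omega : j < xb.2.length)]
    rw [hgd, List.map_cons, List.sum_cons]
    ring

theorem shape_matmul {A B : List (List Int)} (hA : ShapeM A) (hB : ShapeM B) :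
    ShapeM (matmulL A B) := by
  have hBh : (B.headD []).length = 75 := by
    rcases B with _ | ⟨r, t⟩
    · exact absurd hB.1 (by simp)
    · exact hB.2 r (by simp)
  constructor
  · rw [matmulL, List.length_map]; exact hA.1
  · intro r hr
    rw [matmulL] at hr
    obtain ⟨row, hrow, rfl⟩ := List.mem_map.1 hr
    rw [List.length_map]
    have hzw := zw_fold (row.zip B) (List.replicate (B.headD []).length 0)
      (by
        intro xb hxb
        have hm := (List.of_mem_zip hxb).2
        rw [List.length_replicate, hBh, hB.2 xb.2 hm])
    rw [rowmul, hzw.1, List.length_replicate, hBh]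

theorem toMat_matmul {A B : List (List Int)} (hA : ShapeM A) (hB : ShapeM B) :
    toMat (matmulL A B) = toMat A * toMat B := by
  have hBh : (B.headD []).length = 75 := by
    rcases B with _ | ⟨r, t⟩
    · exact absurd hB.1 (by simp)
    · exact hB.2 r (by simp)
  funext i j
  show (((matmulL A B).getD i.1 []).getD j.1 0 : ZM) = ∑ k : Fin 75, toMat A i k * toMat B k j
  have hi : i.1 < A.length := by rw [hA.1]; exact i.2
  have hrow : (matmulL A B).getD i.1 [] = ((rowmul (A.getD i.1 []) B).map (fun v => PySem.Int.mod v 1000000000)) := by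
    rw [matmulL, List.getD_eq_getElem?_getD, List.getElem?_map, List.getElem?_eq_getElem hi]
    simp [List.getD_eq_getElem?_getD, List.getElem?_eq_getElem hi]
  rw [hrow]
  set row := A.getD i.1 [] with hrowdef
  have hrl : row.length = 75 := by
    have hre : row = A[i.1] := by
      rw [hrowdef, List.getD_eq_getElem?_getD, List.getElem?_eq_getElem hi]
      rfl
    rw [hre]
    exact hA.2 _ (List.getElem_mem hi)
  have hpre : ∀ xb ∈ row.zip B, (List.replicate (B.headD []).length (0:Int)).length ≤ xb.2.length := by
    intro xb hxb
    rw [List.length_replicate, hBh, hB.2 xb.2 (List.of_mem_zip hxb).2]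
  obtain ⟨hzl, hzv⟩ := zw_fold (row.zip B) (List.replicate (B.headD []).length 0) hpre
  have hj75 : j.1 < (rowmul row B).length := by
    rw [rowmul, hzl, List.length_replicate, hBh]; exact j.2
  have hentry : ((rowmul row B).map (fun v => PySem.Int.mod v 1000000000)).getD j.1 0
      = PySem.Int.mod ((rowmul row B).getD j.1 0) 1000000000 := by
    rw [List.getD_eq_getElem?_getD, List.getElem?_map, List.getElem?_eq_getElem hj75]
    simp [List.getD_eq_getElem?_getD, List.getElem?_eq_getElem hj75]
  rw [hentry, castMod]
  have hrv : (rowmul row B).getD j.1 0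
      = ((row.zip B).map (fun xb => xb.1 * xb.2.getD j.1 0)).sum := by
    have hv := hzv j.1 (by rw [List.length_replicate, hBh]; exact j.2)
    rw [rowmul, hv]
    rw [List.getD_eq_getElem?_getD]
    rw [List.getElem?_eq_getElem (by rw [List.length_replicate, hBh]; exact j.2)]
    simp
  rw [hrv, Int.cast_list_sum, List.map_map, map_sum_eq_range_pairs]
  have hzlen : (row.zip B).length = 75 := by
    rw [List.length_zip, hrl, hB.1]
    rfl
  rw [hzlen]
  have hRHS : (∑ k : Fin 75, toMat A i k * toMat B k j)
      = ∑ k ∈ Finset.range 75, (fun k0 : Nat =>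
          (((A.getD i.1 []).getD k0 0 : Int) : ZM) * (((B.getD k0 []).getD j.1 0 : Int) : ZM)) k :=
    Fin.sum_univ_eq_sum_range (fun k0 : Nat =>
          (((A.getD i.1 []).getD k0 0 : Int) : ZM) * (((B.getD k0 []).getD j.1 0 : Int) : ZM)) 75
  rw [hRHS]
  apply Finset.sum_congr rfl
  intro k hk
  have hk75 : k < 75 := Finset.mem_range.1 hk
  have hzk : (row.zip B).getD k (0, []) = (row[k]'(by omega), B[k]'(by rw [hB.1]; omega)) := by
    rw [List.getD_eq_getElem?_getD, List.getElem?_eq_getElem (by rw [hzlen]; omega)]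
    simp [List.getElem_zip]
  rw [hzk]
  have h1 : (A.getD i.1 []).getD k 0 = row[k]'(by omega) := by
    rw [← hrowdef, List.getD_eq_getElem?_getD, List.getElem?_eq_getElem (by omega : k < row.length)]
    rfl
  have h2 : (B.getD k []).getD j.1 0 = (B[k]'(by rw [hB.1]; omega)).getD j.1 0 := by
    rw [List.getD_eq_getElem?_getD (l := B), List.getElem?_eq_getElem (by rw [hB.1]; omega : k < B.length)]
    rfl
  simp only [Function.comp_apply]
  rw [← h1, ← h2]
  push_cast
  ring

theorem powLoop_spec : ∀ (e : Nat) (M R : List (List Int)), ShapeM M → ShapeM R →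
    ShapeM (powLoop M R e) ∧ toMat (powLoop M R e) = toMat R * (toMat M)^e := by
  intro e
  induction e using Nat.strong_induction_on with
  | _ e ih =>
    intro M R hM hR
    by_cases he : e = 0
    · subst he
      rw [powLoop]
      simp [hR]
    · rw [powLoop, if_neg he]
      have hMM : ShapeM (matmulL M M) := shape_matmul hM hM
      have hR' : ShapeM (if e % 2 = 1 then matmulL R M else R) := by
        split_ifs
        · exact shape_matmul hR hM
        · exact hR
      obtain ⟨hs, hv⟩ := ih (e / 2) (Nat.div_lt_self (Nat.pos_of_ne_zero he) (by norm_num)) _ _ hMM hR'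
      refine ⟨hs, ?_⟩
      rw [hv, toMat_matmul hM hM]
      have hsplit : (toMat R * (toMat M)^(e % 2)) * ((toMat M * toMat M))^(e / 2)
          = toMat R * (toMat M)^e := by
        rw [← pow_two, ← pow_mul, mul_assoc, ← pow_add]
        congr 2
        omega
      rcases Nat.mod_two_eq_zero_or_one e with h2 | h2
      · rw [if_neg (by omega)]
        rw [← hsplit, h2, pow_zero, mul_one]
      · rw [if_pos h2]
        rw [toMat_matmul hR hM, ← hsplit, h2, pow_one]

theorem shape_matLit : ShapeM matLit := by
  constructor
  · rw [matLit, List.length_map, List.length_range]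
  · intro r hr
    obtain ⟨x, _, rfl⟩ := List.mem_map.1 hr
    rw [List.length_map, List.length_range]

theorem shape_idMat : ShapeM idMat := by
  constructor
  · rw [idMat, List.length_map, List.length_range]
  · intro r hr
    obtain ⟨x, _, rfl⟩ := List.mem_map.1 hr
    rw [List.length_map, List.length_range]

theorem getD_map_range {α : Type} (f : Nat → α) (n i : Nat) (d : α) (hi : i < n) :
    ((List.range n).map f).getD i d = f i := by
  rw [List.getD_eq_getElem?_getD, List.getElem?_map, List.getElem?_range hi]
  rfl

theorem toMat_matLit : toMat matLit = A0 := by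
  funext i j
  show ((((matLit.getD i.1 []).getD j.1 0 : Int)) : ZM) = ((entryB i.1 j.1 : Int) : ZM)
  rw [matLit, getD_map_range _ _ _ _ i.2, getD_map_range _ _ _ _ j.2]

theorem toMat_idMat : toMat idMat = 1 := by
  funext i j
  show ((((idMat.getD i.1 []).getD j.1 0 : Int)) : ZM) = (1 : MatZ) i j
  rw [idMat, getD_map_range _ _ _ _ i.2, getD_map_range _ _ _ _ j.2, Matrix.one_apply]
  by_cases h : i = j
  · rw [if_pos h, if_pos (by rw [h]), Int.cast_one]
  · rw [if_neg h, if_neg (fun hc => h (Fin.ext hc)), Int.cast_zero]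

def SLn (j : Nat) : Int := statesL.getD j 0

def flatU (u : U) : Fin 75 → ZM := fun i => u ⟨i.1 / 25, by omega⟩ (SLn (i.1 % 25))

theorem SLn_mem {j : Nat} (hj : j < 25) : SLn j ∈ statesL := by
  rw [SLn, List.getD_eq_getElem?_getD, List.getElem?_eq_getElem (by rw [show statesL.length = 25 from rfl]; omega)]
  exact List.getElem_mem _

theorem sum_states (g : Int → ZM) :
    ∑ p ∈ statesL.toFinset, g p = ∑ j ∈ Finset.range 25, g (SLn j) := by
  rw [List.sum_toFinset _ statesL_nodup, map_sum_eq_range g 0 statesL]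
  rfl

theorem count_eq_cntE {p : Int} (hp : p ∈ statesL) (d : Nat) (y : Int) :
    ((edgesT.getD p []).count (((d : Int) + 1), y) = cntE p (d+1) y) := by
  rw [List.count_eq_countP, cntE]
  apply List.countP_congr
  intro dy hdy
  have hpos := (edge_fact hp hdy).1
  by_cases h : dy = (((d : Int) + 1), y)
  · subst h
    simp only [beq_self_eq_true]
    have h1 : ((((d : Int) + 1), y) : Int × Int).1.toNat = d + 1 := by
      show ((d : Int) + 1).toNat = d + 1
      omega
    simp [h1]
  · have hne : ¬ (dy.1.toNat = d + 1 ∧ dy.2 = y) := by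
      rintro ⟨h1, h2⟩
      exact h (Prod.ext_iff.2 ⟨by omega, h2⟩)
    have hL : (dy == (((d : Int) + 1), y)) = false := by
      simp [h]
    have hLR : ((((d : Int) + 1), y) == dy) = false := by
      simp [Ne.symm h]
    have hR : ((dy.1.toNat == d + 1) && (dy.2 == y)) = false := by
      cases h1 : (dy.1.toNat == d + 1)
      · simp
      · cases h2 : (dy.2 == y)
        · simp
        · exfalso
          exact hne ⟨by simpa using h1, by simpa using h2⟩
    rw [hR]
    simp [hL]

theorem entryB_cast {si pi : Nat} (hsi : si < 3) (hpi : pi < 25) (s : Fin 3) (j : Fin 25) :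
    ((entryB (25*si+pi) (25*s.1+j.1) : Int) : ZM)
      = (if s.1 = si + 1 ∧ pi = j.1 then 1 else 0)
        + (if s.1 = 0 then (cntE (SLn j.1) (si+1) (SLn pi) : ZM) else 0) := by
  have hdiv : ∀ (a b : Nat), b < 25 → (25*a+b) / 25 = a := by
    intro a b hb; omega
  have hmod : ∀ (a b : Nat), b < 25 → (25*a+b) % 25 = b := by
    intro a b hb; omega
  rw [entryB]
  simp only [hdiv si pi hpi, hmod si pi hpi, hdiv s.1 j.1 j.2, hmod s.1 j.1 j.2]
  by_cases hs0 : s.1 = 0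
  · rw [hs0]
    have hc := congrArg (fun n : Nat => (n : ZM)) (count_eq_cntE (SLn_mem j.2) si (SLn pi))
    simp only [SLn] at hc
    rw [if_neg (by omega : ¬ ((0:Nat) = si + 1 ∧ pi = j.1)), zero_add]
    push_cast at hc ⊢
    simp_all [SLn]
  · rw [if_neg hs0, if_neg hs0, add_zero]
    by_cases hse : s.1 = si + 1 ∧ pi = j.1
    · rw [if_pos hse, if_pos hse]; norm_num
    · rw [if_neg hse, if_neg hse]; norm_num

theorem enc_bij : Function.Bijective (fun p : Fin 3 × Fin 25 => (⟨25 * p.1.1 + p.2.1, by omega⟩ : Fin 75)) := by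
  constructor
  · intro a b hab
    have h := congrArg Fin.val hab
    simp only at h
    have h1 : a.1.1 = b.1.1 ∧ a.2.1 = b.2.1 := by
      have := a.1.2; have := b.1.2; have := a.2.2; have := b.2.2
      omega
    exact Prod.ext (Fin.ext h1.1) (Fin.ext h1.2)
  · intro k
    exact ⟨(⟨k.1 / 25, by omega⟩, ⟨k.1 % 25, by omega⟩), by
      apply Fin.ext
      simp only
      omega⟩

set_option maxHeartbeats 1600000 in
theorem flat_step (u : U) (i : Fin 75) :
    flatU (stepU u) i = ∑ k : Fin 75, A0 i k * flatU u k := by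
  have hsi3 : i.1 / 25 < 3 := by omega
  have hpi25 : i.1 % 25 < 25 := by omega
  set si := i.1 / 25 with hsi
  set pi := i.1 % 25 with hpi
  have hLHS : flatU (stepU u) i = stepU u ⟨si, hsi3⟩ (SLn pi) := rfl
  clear_value si pi
  have hidec : i.1 = 25 * si + pi := by omega
  have hsum1 : (∑ k : Fin 75, A0 i k * flatU u k)
      = ∑ p : Fin 3 × Fin 25, A0 i ⟨25 * p.1.1 + p.2.1, by omega⟩ * flatU u ⟨25 * p.1.1 + p.2.1, by omega⟩ :=
    (Fintype.sum_bijective _ enc_bij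
      (fun p : Fin 3 × Fin 25 => A0 i ⟨25 * p.1.1 + p.2.1, by omega⟩ * flatU u ⟨25 * p.1.1 + p.2.1, by omega⟩)
      (fun k => A0 i k * flatU u k) (fun p => rfl)).symm
  rw [hsum1, Fintype.sum_prod_type]
  have hA0 : ∀ (s : Fin 3) (j : Fin 25), A0 i (⟨25 * s.1 + j.1, by omega⟩ : Fin 75)
      = (if s.1 = si + 1 ∧ pi = j.1 then 1 else 0)
        + (if s.1 = 0 then (cntE (SLn j.1) (si+1) (SLn pi) : ZM) else 0) := by
    intro s j
    have h0 : A0 i (⟨25 * s.1 + j.1, by omega⟩ : Fin 75) = ((entryB (25*si+pi) (25*s.1+j.1) : Int) : ZM) := by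
      show ((entryB i.1 (25*s.1+j.1) : Int) : ZM) = _
      rw [← hidec]
    rw [h0, entryB_cast hsi3 hpi25 s j]
  have hflat : ∀ (s : Fin 3) (j : Fin 25), flatU u (⟨25 * s.1 + j.1, by omega⟩ : Fin 75) = u s (SLn j.1) := by
    intro s j
    show u ⟨(25 * s.1 + j.1) / 25, by omega⟩ (SLn ((25 * s.1 + j.1) % 25)) = u s (SLn j.1)
    have h2 : (25 * s.1 + j.1) % 25 = j.1 := by omega
    have hfin : (⟨(25 * s.1 + j.1) / 25, by omega⟩ : Fin 3) = s := Fin.ext (by simp only; omega)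
    rw [h2, hfin]
  have hRHS : (∑ s : Fin 3, ∑ j : Fin 25,
        A0 i (⟨25 * s.1 + j.1, by omega⟩ : Fin 75) * flatU u (⟨25 * s.1 + j.1, by omega⟩ : Fin 75))
      = ∑ s : Fin 3, ∑ j : Fin 25,
        (((if s.1 = si + 1 ∧ pi = j.1 then (1:ZM) else 0) * u s (SLn j.1))
          + ((if s.1 = 0 then (cntE (SLn j.1) (si+1) (SLn pi) : ZM) else 0) * u s (SLn j.1))) :=
    Finset.sum_congr rfl fun s _ => Finset.sum_congr rfl fun j _ => by
      rw [hA0 s j, hflat s j, add_mul]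
  rw [hRHS]
  simp only [Finset.sum_add_distrib]
  rw [hLHS, stepU]
  have hshift : (if h : (⟨si, hsi3⟩ : Fin 3).1 + 1 < 3 then u ⟨(⟨si, hsi3⟩ : Fin 3).1 + 1, h⟩ (SLn pi) else 0)
      = ∑ s : Fin 3, ∑ j : Fin 25, (if s.1 = si + 1 ∧ pi = j.1 then (1:ZM) else 0) * u s (SLn j.1) := by
    have hone : ∀ (s : Fin 3), s.1 = si + 1 →
        (∑ j : Fin 25, (if s.1 = si + 1 ∧ pi = j.1 then (1:ZM) else 0) * u s (SLn j.1))
          = u s (SLn pi) := by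
      intro s hs
      have : ∀ j : Fin 25, (if s.1 = si + 1 ∧ pi = j.1 then (1:ZM) else 0) * u s (SLn j.1)
          = if (⟨pi, hpi25⟩ : Fin 25) = j then u s (SLn j.1) else 0 := by
        intro j
        by_cases hpj : pi = j.1
        · rw [if_pos ⟨hs, hpj⟩, one_mul, if_pos (Fin.ext hpj)]
        · rw [if_neg (fun hc => hpj hc.2), zero_mul, if_neg (fun hc => hpj (congrArg Fin.val hc))]
      rw [Finset.sum_congr rfl (fun j _ => this j), Finset.sum_ite_eq]
      simp
    have hzero : ∀ (s : Fin 3), s.1 ≠ si + 1 →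
        (∑ j : Fin 25, (if s.1 = si + 1 ∧ pi = j.1 then (1:ZM) else 0) * u s (SLn j.1)) = 0 := by
      intro s hs
      apply Finset.sum_eq_zero
      intro j _
      rw [if_neg (fun hc => hs hc.1), zero_mul]
    rcases (by omega : si = 0 ∨ si = 1 ∨ si = 2) with h | h | h <;> subst h
    · rw [dif_pos (show (⟨0, hsi3⟩ : Fin 3).1 + 1 < 3 from by show 0 + 1 < 3; omega),
        Fin.sum_univ_three, hzero 0 (by simp), hone 1 rfl, hzero 2 (by simp)]
      simp
    · rw [dif_pos (show (⟨1, hsi3⟩ : Fin 3).1 + 1 < 3 from by show 1 + 1 < 3; omega),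
        Fin.sum_univ_three, hzero 0 (by simp), hzero 1 (by simp), hone 2 rfl]
      simp
    · rw [dif_neg (show ¬((⟨2, hsi3⟩ : Fin 3).1 + 1 < 3) from by show ¬(2 + 1 < 3); omega),
        Fin.sum_univ_three, hzero 0 (by simp), hzero 1 (by simp), hzero 2 (by simp)]
      simp
  have hcnts : (∑ p ∈ statesL.toFinset, (cntE p (si + 1) (SLn pi) : ZM) * u 0 p)
      = ∑ s : Fin 3, ∑ j : Fin 25, (if s.1 = 0 then (cntE (SLn j.1) (si+1) (SLn pi) : ZM) else 0) * u s (SLn j.1) := by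
    rw [Fin.sum_univ_three]
    have hz : ∀ (s : Fin 3), s.1 ≠ 0 →
        (∑ j : Fin 25, (if s.1 = 0 then (cntE (SLn j.1) (si+1) (SLn pi) : ZM) else 0) * u s (SLn j.1)) = 0 := by
      intro s hs
      apply Finset.sum_eq_zero
      intro j _
      rw [if_neg hs, zero_mul]
    rw [hz 1 (by simp), hz 2 (by simp), add_zero, add_zero]
    rw [show (∑ j : Fin 25, (if ((0:Fin 3)).1 = 0 then (cntE (SLn j.1) (si+1) (SLn pi) : ZM) else 0) * u 0 (SLn j.1))
        = ∑ j : Fin 25, (cntE (SLn j.1) (si+1) (SLn pi) : ZM) * u 0 (SLn j.1) from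
      Finset.sum_congr rfl fun j _ => by rw [if_pos (show ((0:Fin 3) : Nat) = 0 from rfl)]]
    rw [sum_states (fun p => (cntE p (si + 1) (SLn pi) : ZM) * u 0 p)]
    exact (Fin.sum_univ_eq_sum_range (fun j0 => (cntE (SLn j0) (si+1) (SLn pi) : ZM) * u 0 (SLn j0)) 25).symm
  rw [hshift, hcnts]

theorem SLn_one : ∀ j : Fin 25, SLn j.1 = 1 → j.1 = 0 := by decide

theorem col_pow (t : Nat) : ∀ (i : Fin 75), (A0^t) i ⟨0, by norm_num⟩ = flatU (uIter t) i := by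
  induction t with
  | zero =>
    intro i
    rw [pow_zero, Matrix.one_apply]
    by_cases h : i = (⟨0, by norm_num⟩ : Fin 75)
    · subst h
      rw [if_pos rfl]
      decide
    · rw [if_neg h]
      symm
      show (if (⟨i.1 / 25, by omega⟩ : Fin 3).1 = 0 ∧ SLn (i.1 % 25) = 1 then (1:ZM) else 0) = 0
      rw [if_neg]
      rintro ⟨h1, h2⟩
      have h1' : i.1 / 25 = 0 := h1
      have h2' : i.1 % 25 = 0 := SLn_one ⟨i.1 % 25, by omega⟩ h2
      exact h (Fin.ext (show i.1 = 0 from by omega))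
  | succ t ih =>
    intro i
    rw [pow_succ', Matrix.mul_apply]
    rw [show uIter (t+1) = stepU (uIter t) from rfl, flat_step]
    exact Finset.sum_congr rfl fun k _ => by rw [ih k]

theorem goodIdx_eq : goodIdx = [0, 1, 2, 4, 10] := by decide

theorem filter_goodB : statesL.filter goodB = [1, 11, 110, 1100, 1001] := by decide

theorem headD_eq_getD {α : Type} (l : List α) (d : α) : l.headD d = l.getD 0 d := by
  cases l <;> rfl

theorem mod_congr (x y : Int) (h : (x : ZM) = (y : ZM)) :
    PySem.Int.mod x 1000000000 = PySem.Int.mod y 1000000000 := by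
  rw [PySem.Int.mod_eq_emod_of_pos (by norm_num : (0:ℤ) < 1000000000),
      PySem.Int.mod_eq_emod_of_pos (by norm_num : (0:ℤ) < 1000000000)]
  have h2 := (ZMod.intCast_eq_intCast_iff' x y 1000000000).1 h
  norm_num at h2
  exact h2

theorem go_alt_eq (n : Int) : go_alt n = PySem.Int.mod
    ((((powLoop matLit idMat n.toNat).getD 0 []).getD 0 0)
     + ((((powLoop matLit idMat n.toNat).getD 1 []).getD 0 0)
     + ((((powLoop matLit idMat n.toNat).getD 2 []).getD 0 0)
     + ((((powLoop matLit idMat n.toNat).getD 4 []).getD 0 0)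
     + ((((powLoop matLit idMat n.toNat).getD 10 []).getD 0 0) + 0))))) 1000000000 := by
  show PySem.Int.mod (goodIdx.foldl
      (fun s i => s + (((powLoop matLit idMat (max n 0).toNat).getD i.toNat []).headD 0)) 0) 1000000000 = _
  rw [show (max n 0).toNat = n.toNat from by omega, goodIdx_eq]
  simp only [List.foldl_cons, List.foldl_nil, headD_eq_getD]
  congr 1
  simp only [show ((0:Int)).toNat = 0 from rfl, show ((1:Int)).toNat = 1 from rfl,
    show ((2:Int)).toNat = 2 from rfl, show ((4:Int)).toNat = 4 from rfl,
    show ((10:Int)).toNat = 10 from rfl]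
  ring

theorem go_spec : Claim_equal_go := by
  intro n _
  show go n = go_alt n
  rw [go_eq, go_alt_eq]
  apply mod_congr
  rw [extract_eq _ _ (rel_iter n.toNat), filter_goodB]
  simp only [List.map_cons, List.map_nil, List.sum_cons, List.sum_nil]
  set t := n.toNat with ht
  have hP : toMat (powLoop matLit idMat t) = A0^t := by
    have h2 := (powLoop_spec t matLit idMat shape_matLit shape_idMat).2
    rw [toMat_matLit, toMat_idMat, one_mul] at h2
    exact h2
  have he : ∀ (i : Fin 75), ((((powLoop matLit idMat t).getD i.1 []).getD 0 0 : Int) : ZM)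
      = flatU (uIter t) i := by
    intro i
    have h1 : ((((powLoop matLit idMat t).getD i.1 []).getD 0 0 : Int) : ZM)
        = toMat (powLoop matLit idMat t) i ⟨0, by norm_num⟩ := rfl
    rw [h1, hP, col_pow]
  have e0 : ((((powLoop matLit idMat t).getD 0 []).getD 0 0 : Int) : ZM) = uIter t 0 1 := by
    have h := he ⟨0, by norm_num⟩
    simpa [flatU, SLn] using h
  have e1 : ((((powLoop matLit idMat t).getD 1 []).getD 0 0 : Int) : ZM) = uIter t 0 11 := by
    have h := he ⟨1, by norm_num⟩
    simpa [flatU, SLn] using h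
  have e2 : ((((powLoop matLit idMat t).getD 2 []).getD 0 0 : Int) : ZM) = uIter t 0 110 := by
    have h := he ⟨2, by norm_num⟩
    simpa [flatU, SLn] using h
  have e3 : ((((powLoop matLit idMat t).getD 4 []).getD 0 0 : Int) : ZM) = uIter t 0 1100 := by
    have h := he ⟨4, by norm_num⟩
    simpa [flatU, SLn] using h
  have e4 : ((((powLoop matLit idMat t).getD 10 []).getD 0 0 : Int) : ZM) = uIter t 0 1001 := by
    have h := he ⟨10, by norm_num⟩
    simpa [flatU, SLn] using h
  push_cast
  rw [e0, e1, e2, e3, e4]
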